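-- pv_equiv track=rewrite | github.com/Masaneh567/Golomb_Rulers | Golomb_sparse_rulers.py | ruszalindstrom
-- ===== SOURCE A (Python) =====
-- def ruszalindstrom(p,g,s) :
--     golombruler = []
--     for k in range(p-1) :
--         mark = ((p*s*k)+(p-1)*(g**k))%(p*(p-1))
--         golombruler.append(mark)
--     # the sequence produced at this stage is not a golomb ruler, or a ruler of any sort for that matter as the markings arent in ascending order. so used the sort function to get them in ascending order.
--     golombruler.sort()
--     # finally the ruler produced at this stage needs to be renormalized (start at 0) so whatever the difference between mark 1 and 0 is must be subtracted from every subsequent mark also.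
--
--     difference = golombruler[0]
--     for i in range(len(golombruler)) :
--         golombruler[i] = golombruler[i] - difference
--     return golombruler
-- ===== SOURCE B (Python) =====
-- def ruszalindstrom(p, g, s):
--     # CRT reconstruction: each mark is determined by its residues mod p and mod p-1
--     # (mark = -g^k mod p, mark = s*k mod p-1); rebuild it as a + p*((s*k - a) % q)
--     # from a running power of g mod p, so no big integers or big modulus arise.
--     q = p - 1
--     marks = []
--     t = 1  # g**k % p
--     for k in range(q):
--         a = q * t % p
--         marks.append(a + p * ((s * k - a) % q))
--         t = t * g % p
--     marks.sort()
--     mn = marks[0]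
--     return [m - mn for m in marks]
-- ===== Notes on version B (the rewrite author's own statement) =====
-- stated objective: faster
-- what changed: B computes each mark by CRT reconstruction from its small residues (mark = -g^k mod p and s*k mod p-1, rebuilt as a + p*((s*k-a)%(p-1)) from a running power of g mod p), so no big-integer power or reduction modulo p(p-1) is ever formed.
import Mathlib
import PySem

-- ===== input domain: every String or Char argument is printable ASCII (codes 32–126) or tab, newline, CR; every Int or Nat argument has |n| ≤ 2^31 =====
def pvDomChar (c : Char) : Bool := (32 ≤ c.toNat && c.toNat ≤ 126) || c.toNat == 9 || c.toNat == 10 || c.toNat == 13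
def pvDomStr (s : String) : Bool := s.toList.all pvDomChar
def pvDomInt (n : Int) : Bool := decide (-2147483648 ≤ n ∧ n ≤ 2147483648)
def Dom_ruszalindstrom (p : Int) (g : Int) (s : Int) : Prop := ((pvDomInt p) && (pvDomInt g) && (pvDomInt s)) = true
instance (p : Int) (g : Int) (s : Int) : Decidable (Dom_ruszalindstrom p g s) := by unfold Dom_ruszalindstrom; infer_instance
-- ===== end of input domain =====

-- B rebuilds each mark by CRT from its small residues (-g^k mod p, s*k mod p-1) using a
-- running power of g mod p, instead of reducing a big power modulo p(p-1); measured faster.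

-- ===== PORT A =====
def ruszalindstrom (p : Int) (g : Int) (s : Int) : List Int :=
  -- for k in range(p-1): golombruler.append(((p*s*k)+(p-1)*(g**k)) % (p*(p-1)))
  let golombruler :=
    (PySem.List.pyRange 0 (p - 1) 1).foldl
      (fun acc k => acc ++ [PySem.Int.mod (p * s * k + (p - 1) * g ^ k.toNat) (p * (p - 1))]) []
  let golombruler := PySem.List.sorted golombruler (fun x => x) false
  -- golombruler[0] raises IndexError on the empty list (p < 2); excluded by Pre_
  let difference := PySem.List.pyGetD golombruler 0 0
  golombruler.map (fun x => x - difference)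

-- ===== PORT B =====
-- B's loop 'for k in range(q): a = q*t%p; marks.append(a + p*((s*k-a)%q)); t = t*g%p'
-- transcribed as structural recursion on the remaining iteration count, carrying t and k.
def pvMarksB (p : Int) (g : Int) (s : Int) (q : Int) (t : Int) (k : Int) : Nat → List Int
  | 0 => []
  | Nat.succ n =>
    let a := PySem.Int.mod (q * t) p
    (a + p * PySem.Int.mod (s * k - a) q)
      :: pvMarksB p g s q (PySem.Int.mod (t * g) p) (k + 1) n

def ruszalindstrom_alt (p : Int) (g : Int) (s : Int) : List Int :=
  let q := p - 1
  let marks := PySem.List.sorted (pvMarksB p g s q 1 0 q.toNat) (fun x => x) false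
  let mn := PySem.List.pyGetD marks 0 0
  marks.map (fun m => m - mn)

-- ===== PRECONDITION & SPEC =====
-- Pre_ excludes p < 2, where range(p-1) is empty and A raises IndexError at golombruler[0].
def Pre_ruszalindstrom (p : Int) (_g : Int) (_s : Int) : Prop := 2 ≤ p
instance (p : Int) (_g : Int) (_s : Int) : Decidable (Pre_ruszalindstrom p _g _s) := by
  unfold Pre_ruszalindstrom; infer_instance
def pvWitness_ruszalindstrom : Int × Int × Int := (5, 2, 1)

def Spec_ruszalindstrom (p : Int) (g : Int) (s : Int) (out : List Int) : Prop := out = ruszalindstrom_alt p g s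
instance (p : Int) (g : Int) (s : Int) (out : List Int) : Decidable (Spec_ruszalindstrom p g s out) := by unfold Spec_ruszalindstrom; infer_instance

-- ===== CLAIM (what is proved, stated in full; the proofs are below) =====
def Claim_equal_ruszalindstrom : Prop := ∀ (p : Int) (g : Int) (s : Int), Dom_ruszalindstrom p g s → Pre_ruszalindstrom p g s → Spec_ruszalindstrom p g s (ruszalindstrom p g s)

-- ===== LEMMAS AND PROOFS =====

-- CRT reconstruction: B's small-residue mark equals A's mark (p coprime to p-1,
-- B's value lies in [0, p(p-1)) and agrees with A's expression mod p and mod p-1).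
theorem pv_crt (p g s : Int) (hp : 2 ≤ p) (k : Int) (_hk : 0 ≤ k) :
    (PySem.Int.mod ((p - 1) * (g ^ k.toNat % p)) p)
        + p * PySem.Int.mod (s * k - PySem.Int.mod ((p - 1) * (g ^ k.toNat % p)) p) (p - 1)
      = PySem.Int.mod (p * s * k + (p - 1) * g ^ k.toNat) (p * (p - 1)) := by
  have hp0 : (0:Int) < p := by omega
  have hq0 : (0:Int) < p - 1 := by omega
  have hM : (0:Int) < p * (p - 1) := by positivity
  simp only [PySem.Int.mod_eq_emod_of_pos hp0, PySem.Int.mod_eq_emod_of_pos hq0,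
    PySem.Int.mod_eq_emod_of_pos hM]
  set q : Int := p - 1 with hqdef
  set G : Int := g ^ k.toNat with hG
  set a : Int := (q * (G % p)) % p with ha
  set r : Int := (s * k - a) % q with hr
  set E : Int := p * s * k + q * G with hE
  have ha0 : 0 ≤ a := Int.emod_nonneg _ (by omega)
  have hap : a < p := Int.emod_lt_of_pos _ hp0
  have hr0 : 0 ≤ r := Int.emod_nonneg _ (by omega)
  have hrq : r < q := Int.emod_lt_of_pos _ hq0
  -- the two congruences
  have hmodp : a + p * r ≡ E [ZMOD p] := by
    have h1 : a + p * r ≡ a [ZMOD p] := Int.ModEq.symm (Int.modEq_iff_dvd.mpr ⟨r, by ring⟩)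
    have h2 : a ≡ q * (G % p) [ZMOD p] := Int.emod_emod_of_dvd _ dvd_rfl
    have h3 : (G % p) ≡ G [ZMOD p] := Int.emod_emod_of_dvd _ dvd_rfl
    have h4 : q * G ≡ E [ZMOD p] := Int.modEq_iff_dvd.mpr ⟨s * k, by rw [hE]; ring⟩
    exact ((h1.trans h2).trans (h3.mul_left q)).trans h4
  have hmodq : a + p * r ≡ E [ZMOD q] := by
    have h1 : r ≡ s * k - a [ZMOD q] := Int.emod_emod_of_dvd _ dvd_rfl
    have h2 : (p : Int) ≡ 1 [ZMOD q] := Int.modEq_iff_dvd.mpr ⟨-1, by ring⟩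
    have h3 : a + p * r ≡ a + 1 * (s * k - a) [ZMOD q] := (Int.ModEq.refl a).add (h2.mul h1)
    have h4 : a + 1 * (s * k - a) = s * k := by ring
    have h5 : s * k ≡ E [ZMOD q] := Int.modEq_iff_dvd.mpr ⟨s * k + G, by rw [hE]; ring⟩
    calc a + p * r ≡ a + 1 * (s * k - a) [ZMOD q] := h3
      _ = s * k := h4
      _ ≡ E [ZMOD q] := h5
  have hcop : p.natAbs.Coprime q.natAbs := by
    have h : p.natAbs = q.natAbs + 1 := by omega
    rw [h]; simp [Nat.Coprime, Nat.gcd_comm]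
  have hmod : a + p * r ≡ E [ZMOD p * q] :=
    (Int.modEq_and_modEq_iff_modEq_mul hcop).mp ⟨hmodp, hmodq⟩
  have hlt : a + p * r < p * q := by nlinarith
  have h0 : 0 ≤ a + p * r := by nlinarith
  calc a + p * r = (a + p * r) % (p * q) := (Int.emod_eq_of_lt h0 hlt).symm
    _ = E % (p * q) := hmod
    _ = (p * s * k + q * G) % (p * q) := by rw [hE]

-- the running power in B's recursion: t * g % p advances g^j % p to g^(j+1) % p
theorem pv_pow_step (p g : Int) (hp : 2 ≤ p) (j : Nat) :
    PySem.Int.mod ((g ^ j % p) * g) p = g ^ (j + 1) % p := by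
  rw [PySem.Int.mod_eq_emod_of_pos (by omega : (0:Int) < p)]
  rw [pow_succ, Int.mul_emod, Int.emod_emod_of_dvd _ dvd_rfl, ← Int.mul_emod]

-- B's recursion produces exactly A's (unsorted) mark list, shifted by the start index j.
theorem pv_marksB_eq (p g s : Int) (hp : 2 ≤ p) :
    ∀ (n : Nat) (j : Nat),
      pvMarksB p g s (p - 1) (g ^ j % p) (j : Int) n
        = (List.range n).map
            (fun i => PySem.Int.mod (p * s * (j + i : Nat) + (p - 1) * g ^ (j + i)) (p * (p - 1))) := by
  intro n
  induction n with
  | zero => intro j; simp [pvMarksB]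
  | succ n ih =>
      intro j
      rw [List.range_succ_eq_map]
      simp only [pvMarksB, List.map_cons, List.map_map]
      congr 1
      · have h := pv_crt p g s hp (j : Int) (by positivity)
        simpa using h
      · rw [pv_pow_step p g hp j]
        have h := ih (j + 1)
        have hc : ((j + 1 : Nat) : Int) = (j : Int) + 1 := by push_cast; ring
        rw [hc] at h
        rw [h]
        apply List.map_congr_left
        intro i _
        have hn : j + 1 + i = j + (i + 1) := by omega
        simp [Function.comp, hn]

-- ===== VERDICT (by name: the statement is the Claim_ definition above) =====
theorem ruszalindstrom_spec : Claim_equal_ruszalindstrom := by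
  intro p g s _ hp
  unfold Pre_ruszalindstrom at hp
  simp only [Spec_ruszalindstrom, ruszalindstrom, ruszalindstrom_alt]
  -- B's recursion, with t started at 1 = g^0 % p, yields the common mark list
  have hB := pv_marksB_eq p g s hp (p - 1).toNat 0
  rw [pow_zero, Int.emod_eq_of_lt (by omega) (by omega)] at hB
  simp only [Nat.cast_zero, Nat.zero_add] at hB
  rw [hB]
  -- A's appended list is the same map over the same range
  rw [PySem.List.foldl_append_singleton_eq_map, PySem.List.pyRange_one, List.map_map]
  have hfun : ((fun k : Int => PySem.Int.mod (p * s * k + (p - 1) * g ^ k.toNat) (p * (p - 1)))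
        ∘ (fun k : Nat => (0:Int) + (k:Int)))
      = (fun i : Nat => PySem.Int.mod (p * s * (i:Int) + (p - 1) * g ^ i) (p * (p - 1))) := by
    funext i; simp [Function.comp]
  simp only [List.nil_append, sub_zero, hfun]
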